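-- pv_equiv track=rewrite | github.com/TuksModelChecking/Satmas | implementation/SATSolver/logic_encoding.py | group_by_assignment
-- ===== SOURCE A (Python) =====
-- from typing import Tuple, List, Dict
--
-- def group_by_assignment(timestep_group, split_var) -> List[dict]:
--     resource_at_timesteps = []
--
--     for timestep in timestep_group:
--         resource_at_timestep = {}
--         for resource_assigment_pair in timestep_group[timestep]:
--             (var, assignment) = resource_assigment_pair
--             resource_id_index = var.index(split_var)
--             binary_id_index = var.index('b')
--
--             resource_id = var[resource_id_index+len(split_var):binary_id_index]
--
--             if resource_id in resource_at_timestep: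
--                 resource_at_timestep[resource_id] += str(assignment)
--             else:
--                 resource_at_timestep[resource_id] = f'{assignment}'
--
--         for resource in resource_at_timestep:
--             resource_at_timestep[resource] = int(resource_at_timestep[resource][::-1],2)
--
--         resource_at_timesteps.append(resource_at_timestep)
--
--     return resource_at_timesteps
-- ===== SOURCE B (Python) =====
-- def group_by_assignment(timestep_group, split_var):
--     resource_at_timesteps = []
--     for timestep in timestep_group:
--         grouped = {}
--         for (var, assignment) in timestep_group[timestep]:
--             resource_id = var[var.index(split_var) + len(split_var):var.index('b')]
--             value, pos = grouped.get(resource_id, (0, 0))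
--             grouped[resource_id] = (value + assignment * 2 ** pos, pos + 1)
--         resource_at_timesteps.append({rid: vp[0] for (rid, vp) in grouped.items()})
--     return resource_at_timesteps
-- ===== Notes on version B (the rewrite author's own statement) =====
-- stated objective: alternative
-- what changed: Replaces A's per-resource bit-string concatenation followed by reverse-and-parse int(s[::-1],2) with direct little-endian integer accumulation: each resource keeps (value, bit position) and every pair adds assignment*2**pos.
-- outside the precondition, e.g. on group_by_assignment({'t0': [('xr1b', 10)]}, 'r'): A returns [{'1': 1}], B returns [{'1': 10}]
import Mathlib
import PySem

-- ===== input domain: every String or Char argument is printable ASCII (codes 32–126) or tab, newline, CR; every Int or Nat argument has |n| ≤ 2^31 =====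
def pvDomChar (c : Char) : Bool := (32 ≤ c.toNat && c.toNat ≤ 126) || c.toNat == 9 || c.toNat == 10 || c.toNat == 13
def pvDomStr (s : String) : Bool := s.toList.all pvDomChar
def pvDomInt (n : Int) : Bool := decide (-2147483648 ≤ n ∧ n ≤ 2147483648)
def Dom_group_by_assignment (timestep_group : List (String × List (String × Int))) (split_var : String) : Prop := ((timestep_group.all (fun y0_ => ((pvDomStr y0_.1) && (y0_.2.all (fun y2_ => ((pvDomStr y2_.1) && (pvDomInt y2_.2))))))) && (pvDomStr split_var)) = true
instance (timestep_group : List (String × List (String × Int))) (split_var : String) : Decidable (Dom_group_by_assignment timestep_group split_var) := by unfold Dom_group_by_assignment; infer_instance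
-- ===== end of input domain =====

-- B replaces A's per-resource bit-string concatenation + reversed base-2 parse by direct
-- little-endian integer accumulation (value, bit position) per resource (objective: alternative).


-- ===== PORT A =====
-- int(s, 2) hand-ported: exact on the nonempty '0'/'1'-digit strings Pre_ admits
-- (Python's int(s, 2) additionally tolerates sign/whitespace/underscores, which Pre_ excludes).
def binParse (cs : List Char) : Int :=
  cs.foldl (fun a c => 2 * a + (if c = '1' then 1 else 0)) 0

-- dict values are strings, kept as List Char (PySem's reasoning representation of str).
-- Python's in-place value-overwrite loop 'for r in d: d[r] = int(d[r][::-1], 2)' changes the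
-- value type (str -> int), so it is rendered as building the int dict over d's keys in order,
-- which yields the same keys, order and values as the in-place overwrite.
def group_by_assignment (timestep_group : List (String × List (String × Int))) (split_var : String) : List (List (String × Int)) :=
  timestep_group.foldl (fun resource_at_timesteps timestep =>
    let d : PySem.Dict String (List Char) :=
      timestep.2.foldl (fun d p =>
        let resource_id_index := PySem.Str.find p.1 split_var
        let binary_id_index := PySem.Str.find p.1 "b"
        let resource_id := PySem.Str.slice p.1 (some (resource_id_index + PySem.Str.len split_var)) (some binary_id_index)
        if d.contains resource_id then
          d.insert resource_id ((d.get? resource_id).getD [] ++ PySem.Int.toChars p.2)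
        else
          d.insert resource_id (PySem.Int.toChars p.2)) PySem.Dict.empty
    let dInt : PySem.Dict String Int :=
      d.keys.foldl (fun dInt r => dInt.insert r (binParse ((d.get? r).getD []).reverse)) PySem.Dict.empty
    resource_at_timesteps ++ [dInt.items]) []

-- ===== PORT B =====
def group_by_assignment_alt (timestep_group : List (String × List (String × Int))) (split_var : String) : List (List (String × Int)) :=
  timestep_group.foldl (fun resource_at_timesteps timestep =>
    let grouped : PySem.Dict String (Int × Nat) :=
      timestep.2.foldl (fun grouped p =>
        let resource_id := PySem.Str.slice p.1 (some (PySem.Str.find p.1 split_var + PySem.Str.len split_var)) (some (PySem.Str.find p.1 "b"))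
        let vp := grouped.getD resource_id (0, 0)
        grouped.insert resource_id (vp.1 + p.2 * 2 ^ vp.2, vp.2 + 1)) PySem.Dict.empty
    resource_at_timesteps ++ [grouped.items.map (fun q => (q.1, q.2.1))]) []

-- ===== PRECONDITION & SPEC =====
-- Pre_ excludes the inputs where A raises ValueError (a var missing split_var or 'b', or an
-- assignment whose str() is not all '0'/'1' digits) and, beyond that, assignments other than the
-- bits 0 and 1: on integers like 10 whose decimal digits are all 0/1, A still returns, but its
-- value is an accident of splicing the multi-digit decimal string into the per-resource bit
-- string, which B's positional arithmetic (assignment*2**pos) does not reproduce.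
def Pre_group_by_assignment (timestep_group : List (String × List (String × Int))) (split_var : String) : Prop :=
  ∀ ts ∈ timestep_group, ∀ p ∈ ts.2,
    PySem.Str.isIn split_var p.1 = true ∧ PySem.Str.isIn "b" p.1 = true ∧ (p.2 = 0 ∨ p.2 = 1)
instance (timestep_group : List (String × List (String × Int))) (split_var : String) : Decidable (Pre_group_by_assignment timestep_group split_var) := by unfold Pre_group_by_assignment; infer_instance

def pvWitness_group_by_assignment : (List (String × List (String × Int))) × String :=
  ([("t0", [("arb0", 1), ("arb0", 0), ("ar2b1", 1)])], "r")

def Spec_group_by_assignment (timestep_group : List (String × List (String × Int))) (split_var : String) (out : List (List (String × Int))) : Prop := out = group_by_assignment_alt timestep_group split_var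
instance (timestep_group : List (String × List (String × Int))) (split_var : String) (out : List (List (String × Int))) : Decidable (Spec_group_by_assignment timestep_group split_var out) := by unfold Spec_group_by_assignment; infer_instance

-- ===== CLAIM (what is proved, stated in full; the proofs are below) =====
def Claim_equal_group_by_assignment : Prop := ∀ (timestep_group : List (String × List (String × Int))) (split_var : String), Dom_group_by_assignment timestep_group split_var → Pre_group_by_assignment timestep_group split_var → Spec_group_by_assignment timestep_group split_var (group_by_assignment timestep_group split_var)

-- ===== LEMMAS AND PROOFS =====

-- value map relating A's per-resource string to B's (value, bit-position) pair
def pvG (cs : List Char) : Int × Nat := (binParse cs.reverse, cs.length)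

def pvMapVal {ν ν' : Type} (g : ν → ν') (d : PySem.Dict String ν) : PySem.Dict String ν' :=
  PySem.Dict.mk (d.items.map (fun q => (q.1, g q.2)))

theorem pvGet?_mapVal {ν ν' : Type} (g : ν → ν') (d : PySem.Dict String ν) (k : String) :
    (pvMapVal g d).get? k = (d.get? k).map g := by
  obtain ⟨l⟩ := d
  induction l with
  | nil => rfl
  | cons q rest ih =>
      obtain ⟨a, b⟩ := q
      simp only [pvMapVal, List.map_cons] at *
      rw [PySem.Dict.get?_mk_cons, PySem.Dict.get?_mk_cons]
      by_cases h : (a == k) = true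
      · simp [h]
      · simp only [h, if_neg, Bool.false_eq_true, not_false_iff] at *
        exact ih

theorem pvContains_mapVal {ν ν' : Type} (g : ν → ν') (d : PySem.Dict String ν) (k : String) :
    (pvMapVal g d).contains k = d.contains k := by
  rw [PySem.Dict.contains_eq_isSome_get?, PySem.Dict.contains_eq_isSome_get?, pvGet?_mapVal]
  cases d.get? k <;> rfl

theorem pvMapVal_insert {ν ν' : Type} (g : ν → ν') (d : PySem.Dict String ν) (k : String) (v : ν) :
    pvMapVal g (d.insert k v) = (pvMapVal g d).insert k (g v) := by
  apply PySem.Dict.ext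
  show ((d.insert k v).items.map (fun q => (q.1, g q.2))) = ((pvMapVal g d).insert k (g v)).items
  rw [PySem.Dict.items_insert, PySem.Dict.items_insert, pvContains_mapVal]
  by_cases h : d.contains k = true
  · simp only [h, if_true, pvMapVal, List.map_map]
    apply List.map_congr_left
    intro q _
    by_cases hq : q.1 = k <;> simp [hq]
  · simp only [h, Bool.false_eq_true, if_false, pvMapVal, List.map_append, List.map_cons, List.map_nil]

theorem pvBinParse_acc (t : List Char) (a0 : Int) :
    t.foldl (fun a c => 2 * a + (if c = '1' then 1 else 0)) a0
      = a0 * 2 ^ t.length + t.foldl (fun a c => 2 * a + (if c = '1' then 1 else 0)) 0 := by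
  induction t generalizing a0 with
  | nil => simp
  | cons c t ih =>
      simp only [List.foldl_cons, List.length_cons]
      rw [ih (2 * a0 + _), ih (2 * 0 + _)]
      ring

theorem pvBinParse_cons (c : Char) (t : List Char) :
    binParse (c :: t) = (if c = '1' then (1:Int) else 0) * 2 ^ t.length + binParse t := by
  simp only [binParse, List.foldl_cons]
  rw [pvBinParse_acc t (2 * 0 + _)]
  ring_nf

theorem pvG_append_bit (v : List Char) (a : Int) (ha : a = 0 ∨ a = 1) :
    pvG (v ++ PySem.Int.toChars a) = ((pvG v).1 + a * 2 ^ (pvG v).2, (pvG v).2 + 1) := by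
  rcases ha with h | h <;> subst h
  · rw [show PySem.Int.toChars (0:Int) = ['0'] from by decide]
    simp only [pvG, List.reverse_append, List.reverse_cons, List.reverse_nil, List.nil_append,
      List.singleton_append, List.length_append, List.length_cons, List.length_nil]
    rw [pvBinParse_cons]
    simp [List.length_reverse]
  · rw [show PySem.Int.toChars (1:Int) = ['1'] from by decide]
    simp only [pvG, List.reverse_append, List.reverse_cons, List.reverse_nil, List.nil_append,
      List.singleton_append, List.length_append, List.length_cons, List.length_nil]
    rw [pvBinParse_cons]
    simp [List.length_reverse]
    ring

theorem pvG_singleton_bit (a : Int) (ha : a = 0 ∨ a = 1) :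
    pvG (PySem.Int.toChars a) = (0 + a * 2 ^ (0:Nat), 0 + 1) := by
  rcases ha with h | h <;> subst h <;> decide

-- B's inner fold over the pairs tracks A's inner fold through pvMapVal
theorem pvInner_fold (split_var : String) (l : List (String × Int)) (d : PySem.Dict String (List Char))
    (hl : ∀ p ∈ l, p.2 = 0 ∨ p.2 = 1) :
    l.foldl (fun grouped p =>
        let resource_id := PySem.Str.slice p.1 (some (PySem.Str.find p.1 split_var + PySem.Str.len split_var)) (some (PySem.Str.find p.1 "b"))
        let vp := grouped.getD resource_id (0, 0)
        grouped.insert resource_id (vp.1 + p.2 * 2 ^ vp.2, vp.2 + 1)) (pvMapVal pvG d)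
      = pvMapVal pvG (l.foldl (fun d p =>
        let resource_id_index := PySem.Str.find p.1 split_var
        let binary_id_index := PySem.Str.find p.1 "b"
        let resource_id := PySem.Str.slice p.1 (some (resource_id_index + PySem.Str.len split_var)) (some binary_id_index)
        if d.contains resource_id then
          d.insert resource_id ((d.get? resource_id).getD [] ++ PySem.Int.toChars p.2)
        else
          d.insert resource_id (PySem.Int.toChars p.2)) d) := by
  induction l generalizing d with
  | nil => rfl
  | cons p l ih =>
      simp only [List.foldl_cons]
      have hp := hl p (List.mem_cons_self ..)
      have hrest : ∀ q ∈ l, q.2 = 0 ∨ q.2 = 1 := fun q hq => hl q (List.mem_cons_of_mem _ hq)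
      set k := PySem.Str.slice p.1 (some (PySem.Str.find p.1 split_var + PySem.Str.len split_var)) (some (PySem.Str.find p.1 "b")) with hk
      show _ = _
      by_cases hc : d.contains k = true
      · have hg : ∃ v, d.get? k = some v := by
          have := PySem.Dict.contains_eq_isSome_get? d k
          rw [hc] at this
          exact Option.isSome_iff_exists.mp this.symm
        obtain ⟨v, hv⟩ := hg
        have hgd : (pvMapVal pvG d).getD k (0, 0) = pvG v := by
          rw [PySem.Dict.getD_eq_get?_getD, pvGet?_mapVal, hv]; rfl
        rw [← ih _ hrest]
        congr 1
        simp only [hc, if_true, hgd, hv, Option.getD_some]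
        rw [pvMapVal_insert, pvG_append_bit v p.2 hp]
      · have hv : d.get? k = none := by
          have := PySem.Dict.contains_eq_isSome_get? d k
          rw [Bool.not_eq_true] at hc
          rw [hc] at this
          cases h : d.get? k with
          | none => rfl
          | some v => rw [h] at this; simp at this
        have hgd : (pvMapVal pvG d).getD k (0, 0) = (0, 0) := by
          rw [PySem.Dict.getD_eq_get?_getD, pvGet?_mapVal, hv]; rfl
        rw [← ih _ hrest]
        congr 1
        simp only [hc, Bool.false_eq_true, if_false, hgd]
        rw [pvMapVal_insert, pvG_singleton_bit p.2 hp]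

-- A's inner-fold step always inserts at its key, so keys stay Nodup
theorem pvNodup_keys_inner (split_var : String) (l : List (String × Int)) :
    (l.foldl (fun d p =>
        let resource_id_index := PySem.Str.find p.1 split_var
        let binary_id_index := PySem.Str.find p.1 "b"
        let resource_id := PySem.Str.slice p.1 (some (resource_id_index + PySem.Str.len split_var)) (some binary_id_index)
        if d.contains resource_id then
          d.insert resource_id ((d.get? resource_id).getD [] ++ PySem.Int.toChars p.2)
        else
          d.insert resource_id (PySem.Int.toChars p.2)) (PySem.Dict.empty : PySem.Dict String (List Char))).keys.Nodup := by
  have h : ∀ (d : PySem.Dict String (List Char)) (p : String × Int),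
      (let resource_id_index := PySem.Str.find p.1 split_var
       let binary_id_index := PySem.Str.find p.1 "b"
       let resource_id := PySem.Str.slice p.1 (some (resource_id_index + PySem.Str.len split_var)) (some binary_id_index)
       if d.contains resource_id then
         d.insert resource_id ((d.get? resource_id).getD [] ++ PySem.Int.toChars p.2)
       else
         d.insert resource_id (PySem.Int.toChars p.2))
      = d.insert (PySem.Str.slice p.1 (some (PySem.Str.find p.1 split_var + PySem.Str.len split_var)) (some (PySem.Str.find p.1 "b")))
        (if d.contains (PySem.Str.slice p.1 (some (PySem.Str.find p.1 split_var + PySem.Str.len split_var)) (some (PySem.Str.find p.1 "b"))) then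
          ((d.get? (PySem.Str.slice p.1 (some (PySem.Str.find p.1 split_var + PySem.Str.len split_var)) (some (PySem.Str.find p.1 "b")))).getD [] ++ PySem.Int.toChars p.2)
         else PySem.Int.toChars p.2) := by
    intro d p
    simp only []
    split_ifs <;> rfl
  simp only [h]
  exact PySem.Dict.nodup_keys_foldl_insert_key l _ _ _ PySem.Dict.nodup_keys_empty

-- per-timestep: A's finalized item list equals B's projected item list
theorem pvTimestep (split_var : String) (pairs : List (String × Int))
    (hl : ∀ p ∈ pairs, p.2 = 0 ∨ p.2 = 1) :
    (let d : PySem.Dict String (List Char) :=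
      pairs.foldl (fun d p =>
        let resource_id_index := PySem.Str.find p.1 split_var
        let binary_id_index := PySem.Str.find p.1 "b"
        let resource_id := PySem.Str.slice p.1 (some (resource_id_index + PySem.Str.len split_var)) (some binary_id_index)
        if d.contains resource_id then
          d.insert resource_id ((d.get? resource_id).getD [] ++ PySem.Int.toChars p.2)
        else
          d.insert resource_id (PySem.Int.toChars p.2)) PySem.Dict.empty
     let dInt : PySem.Dict String Int :=
      d.keys.foldl (fun dInt r => dInt.insert r (binParse ((d.get? r).getD []).reverse)) PySem.Dict.empty
     dInt.items)
    = (let grouped : PySem.Dict String (Int × Nat) :=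
        pairs.foldl (fun grouped p =>
          let resource_id := PySem.Str.slice p.1 (some (PySem.Str.find p.1 split_var + PySem.Str.len split_var)) (some (PySem.Str.find p.1 "b"))
          let vp := grouped.getD resource_id (0, 0)
          grouped.insert resource_id (vp.1 + p.2 * 2 ^ vp.2, vp.2 + 1)) PySem.Dict.empty
       grouped.items.map (fun q => (q.1, q.2.1))) := by
  have hBA := pvInner_fold split_var pairs PySem.Dict.empty hl
  have hMapEmpty : (pvMapVal pvG (PySem.Dict.empty : PySem.Dict String (List Char))) = (PySem.Dict.empty : PySem.Dict String (Int × Nat)) := rfl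
  rw [hMapEmpty] at hBA
  show _ = _
  rw [hBA]
  set dA := pairs.foldl _ (PySem.Dict.empty : PySem.Dict String (List Char)) with hdA
  have hnd : dA.keys.Nodup := pvNodup_keys_inner split_var pairs
  -- LHS: fresh inserts over dA.keys
  rw [PySem.Dict.items_foldl_insert_fresh dA.keys (fun r => r) _ PySem.Dict.empty
        (fun a _ => PySem.Dict.contains_empty a) (by simpa using hnd)]
  -- RHS: items of mapped dict, projected
  show dA.keys.map (fun r => (r, binParse ((dA.get? r).getD []).reverse))
      = (dA.items.map (fun q => (q.1, pvG q.2))).map (fun q => (q.1, q.2.1))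
  rw [PySem.Dict.items_eq_map_keys dA hnd []]
  simp only [List.map_map]
  apply List.map_congr_left
  intro k _
  simp only [Function.comp]
  rw [PySem.Dict.getD_eq_get?_getD]
  rfl

-- ===== VERDICT (by name: the statement is the Claim_ definition above) =====
theorem group_by_assignment_spec : Claim_equal_group_by_assignment := by
  intro timestep_group split_var _ hPre
  unfold Spec_group_by_assignment group_by_assignment group_by_assignment_alt
  rw [PySem.List.foldl_append_singleton_eq_map, PySem.List.foldl_append_singleton_eq_map]
  congr 1
  apply List.map_congr_left
  intro ts hts
  exact pvTimestep split_var ts.2 (fun p hp => (hPre ts hts p hp).2.2)
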